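-- pv_equiv track=rewrite | github.com/dizzyplay/djangoboard | blog/paginator.py | page_range_check
-- ===== SOURCE A (Python) =====
-- def page_range_check(page, max_page):
--     if (page-5) < 1:
--         page_start = 1
--     else:
--         page_start = page-5
--
--     for i in range(5):
--         if (page+i) > max_page:
--             page_end = max_page+1
--             break
--         else:
--             page_end = page+i
--
--     return page_start, page_end
-- ===== SOURCE B (Python) =====
-- def page_range_check(page, max_page):
--     return max(1, page - 5), min(page + 4, max_page + 1)
-- ===== Notes on version B (the rewrite author's own statement) =====
-- stated objective: simpler
-- what changed: Replaces the branch plus range(5) loop with break by a closed-form max/min tuple.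
import Mathlib
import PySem

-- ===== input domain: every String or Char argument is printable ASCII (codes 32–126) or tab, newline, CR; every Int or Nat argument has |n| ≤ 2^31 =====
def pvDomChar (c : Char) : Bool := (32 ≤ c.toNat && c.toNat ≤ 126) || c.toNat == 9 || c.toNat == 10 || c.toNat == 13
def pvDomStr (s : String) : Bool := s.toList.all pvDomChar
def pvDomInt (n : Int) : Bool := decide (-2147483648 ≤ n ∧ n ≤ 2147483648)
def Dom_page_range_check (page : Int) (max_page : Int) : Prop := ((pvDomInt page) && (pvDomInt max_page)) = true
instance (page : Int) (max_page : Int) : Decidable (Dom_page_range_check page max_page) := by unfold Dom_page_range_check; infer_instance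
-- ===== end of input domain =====

-- B replaces A's branch and 5-step break loop with the closed-form (max 1 (page-5), min (page+4) (max_page+1)); objective: simpler.


-- ===== PORT A =====
-- loop over range(5) with break: returns page_end
def pageRangeLoopA (page : Int) (max_page : Int) : List Int → Int → Int
  | [], acc => acc
  | i :: rest, acc =>
    if page + i > max_page then max_page + 1
    else pageRangeLoopA page max_page rest (page + i)

def page_range_check (page : Int) (max_page : Int) : Int × Int :=
  let page_start := if page - 5 < 1 then 1 else page - 5
  let page_end := pageRangeLoopA page max_page (PySem.List.pyRange 0 5 1) 0
  (page_start, page_end)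

-- ===== PORT B =====
def page_range_check_alt (page : Int) (max_page : Int) : Int × Int :=
  (max 1 (page - 5), min (page + 4) (max_page + 1))

-- ===== PRECONDITION & SPEC =====
def Spec_page_range_check (page : Int) (max_page : Int) (out : Int × Int) : Prop := out = page_range_check_alt page max_page
instance (page : Int) (max_page : Int) (out : Int × Int) : Decidable (Spec_page_range_check page max_page out) := by unfold Spec_page_range_check; infer_instance

-- ===== CLAIM (what is proved, stated in full; the proofs are below) =====
def Claim_equal_page_range_check : Prop := ∀ (page : Int) (max_page : Int), Dom_page_range_check page max_page → Spec_page_range_check page max_page (page_range_check page max_page)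

-- ===== LEMMAS AND PROOFS =====

-- ===== VERDICT (by name: the statement is the Claim_ definition above) =====
theorem page_range_check_spec : Claim_equal_page_range_check := by
  intro page max_page _
  unfold Spec_page_range_check page_range_check page_range_check_alt
  have h : PySem.List.pyRange 0 5 1 = [0, 1, 2, 3, 4] := by decide
  rw [h]
  simp only [pageRangeLoopA]
  split_ifs <;> simp_all <;> omega
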